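-- pv_equiv track=rewrite | github.com/dcribb19/bitesofpy | code_challenges/305/split_once.py | split_once
-- ===== SOURCE A (Python) =====
-- from string import whitespace
-- from typing import List
--
-- def split_once(text: str, separators: str = None) -> List[str]:
--     '''Takes a string and splits text on separators but only on
--     first instance of the delimiter.'''
--     split_list = []
--
--     if not separators:
--         separators = whitespace
--
--     if not any(separator in text for separator in separators):
--         return [text]
--     else:
--         for char in text:
--             if char in separators:
--                 start, end = text.split(char, maxsplit=1)
--                 split_list.append(start)
--                 text = end
--                 separators = separators.replace(char, '')
--
--                 if not any(separator in text for separator in separators):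
--                     split_list.append(text)
--                     break
--         return split_list
-- ===== SOURCE B (Python) =====
-- from string import whitespace
--
--
-- def split_once(text: str, separators: str = None):
--     """Single left-to-right pass: each separator char splits only on its
--     first occurrence; current piece accumulated char by char."""
--     active = set(separators or whitespace)
--     parts, cur = [], []
--     for ch in text:
--         if ch in active:
--             parts.append(''.join(cur))
--             cur = []
--             active.discard(ch)
--         else:
--             cur.append(ch)
--     parts.append(''.join(cur))
--     return parts
-- ===== Notes on version B (the rewrite author's own statement) =====
-- stated objective: alternative
-- what changed: A repeatedly rescans the remaining text (any(sep in text) plus text.split per separator hit); B makes one left-to-right pass accumulating the current piece, with a set of still-active separator characters.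
import Mathlib
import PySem

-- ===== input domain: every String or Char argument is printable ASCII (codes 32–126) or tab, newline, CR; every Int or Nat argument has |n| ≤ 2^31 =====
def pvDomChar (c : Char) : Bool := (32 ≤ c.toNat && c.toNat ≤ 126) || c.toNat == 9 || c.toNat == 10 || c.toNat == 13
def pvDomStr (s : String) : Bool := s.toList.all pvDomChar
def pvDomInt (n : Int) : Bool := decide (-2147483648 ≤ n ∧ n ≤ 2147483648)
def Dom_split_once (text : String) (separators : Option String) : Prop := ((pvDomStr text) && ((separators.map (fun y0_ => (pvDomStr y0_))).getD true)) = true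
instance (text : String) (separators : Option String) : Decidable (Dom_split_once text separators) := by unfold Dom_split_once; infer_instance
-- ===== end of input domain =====

-- B replaces A's repeated text.split/`in`-rescans by one left-to-right pass with an
-- active-separator set and an accumulated current piece (objective: alternative).

-- ===== PORT A =====
-- string.whitespace = " \t\n\r\x0b\x0c"
def pyWhitespace : List Char := [' ', '\t', '\n', '\r', Char.ofNat 11, Char.ofNat 12]

-- `separators` after `if not separators: separators = whitespace` (shared by both ports,
-- both Pythons compute `separators or whitespace`)
def sepList (separators : Option String) : List Char :=
  match separators with
  | none => pyWhitespace
  | some s => if s.toList = [] then pyWhitespace else s.toList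

-- hand port (exact) of `start, end = text.split(char, maxsplit=1)` for a one-char separator:
-- split at the FIRST occurrence of ch; `none` exactly where Python's unpacking raises
-- ValueError (ch absent) — that branch is unreachable in A, as the proof below shows
def pySplitFirst : List Char → Char → Option (List Char × List Char)
  | [], _ => none
  | c :: rest, ch =>
    if c = ch then some ([], rest)
    else (pySplitFirst rest ch).map (fun p => (c :: p.1, p.2))

-- `any(separator in text for separator in separators)` (one-char needles: `in` is membership)
def anySepIn (seps text : List Char) : Bool := seps.any (fun c => text.contains c)

-- the `for char in text:` loop: iterates over the chars of the ORIGINAL text while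
-- (split_list, text, separators) mutate; `append + break` is the early return
def splitOnceLoop : List Char → List String → List Char → List Char → List String
  | [], splitList, _, _ => splitList
  | char :: restChars, splitList, text, seps =>
    if seps.contains char then
      match pySplitFirst text char with
      | none => splitList            -- unreachable (Python would raise ValueError)
      | some (start, e) =>
        let splitList' := splitList ++ [String.ofList start]
        let seps' := seps.filter (fun c => c != char)   -- separators.replace(char, '')
        if anySepIn seps' e then
          splitOnceLoop restChars splitList' e seps'
        else
          splitList' ++ [String.ofList e]                   -- split_list.append(text); break
    else
      splitOnceLoop restChars splitList text seps

def split_once (text : String) (separators : Option String) : List String :=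
  let seps := sepList separators
  if !(anySepIn seps text.toList) then [text]
  else splitOnceLoop text.toList [] text.toList seps

-- ===== PORT B =====
-- Source B's single pass: active separator set, parts so far, current piece `cur`
def altLoop : List Char → PySem.Set Char → List String → List Char → List String
  | [], _, parts, cur => parts ++ [String.ofList cur]
  | ch :: rest, active, parts, cur =>
    if PySem.Set.contains active ch then
      altLoop rest (PySem.Set.discard active ch) (parts ++ [String.ofList cur]) []
    else
      altLoop rest active parts (cur ++ [ch])

def split_once_alt (text : String) (separators : Option String) : List String :=
  altLoop text.toList (PySem.Set.ofList (sepList separators)) [] []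

-- ===== PRECONDITION & SPEC =====
def Spec_split_once (text : String) (separators : Option String) (out : List String) : Prop := out = split_once_alt text separators
instance (text : String) (separators : Option String) (out : List String) : Decidable (Spec_split_once text separators out) := by unfold Spec_split_once; infer_instance

-- ===== CLAIM (what is proved, stated in full; the proofs are below) =====
def Claim_equal_split_once : Prop := ∀ (text : String) (separators : Option String), Dom_split_once text separators → Spec_split_once text separators (split_once text separators)

-- ===== LEMMAS AND PROOFS =====

-- splitting at the first occurrence, when the prefix is clean of ch
lemma pySplitFirst_clean (pre suf : List Char) (ch : Char) (h : ch ∉ pre) :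
    pySplitFirst (pre ++ ch :: suf) ch = some (pre, suf) := by
  induction pre with
  | nil => simp [pySplitFirst]
  | cons c rest ih =>
    have hc : c ≠ ch := by intro he; exact h (he ▸ List.mem_cons_self)
    simp [pySplitFirst, hc, ih (fun hm => h (List.mem_cons_of_mem _ hm))]

-- once no remaining char is active, B's loop appends the rest of the text as one piece
lemma altLoop_no_active (rest : List Char) (active : PySem.Set Char)
    (parts : List String) : ∀ (cur : List Char),
    (∀ c ∈ rest, c ∉ active) →
    altLoop rest active parts cur = parts ++ [String.ofList (cur ++ rest)] := by
  induction rest with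
  | nil => intro cur _; simp [altLoop]
  | cons c rest ih =>
    intro cur h
    have hc : PySem.Set.contains active c = false := by
      simpa [PySem.Set.contains_iff] using h c List.mem_cons_self
    simp only [altLoop, hc, Bool.false_eq_true, if_false]
    rw [ih (cur ++ [c]) (fun x hx => h x (List.mem_cons_of_mem _ hx))]
    simp

-- the loop invariant: A's remaining text is `cur ++ chars` with `cur` separator-free,
-- A's separator string and B's active set have the same members, and some separator
-- still occurs in the remaining text (A's `continue` condition)
lemma loop_eq (chars : List Char) : ∀ (cur seps : List Char) (active : PySem.Set Char)
    (splitList : List String),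
    (∀ c ∈ cur, c ∉ seps) →
    (∀ c, c ∈ seps ↔ c ∈ active) →
    anySepIn seps (cur ++ chars) = true →
    splitOnceLoop chars splitList (cur ++ chars) seps = altLoop chars active splitList cur := by
  induction chars with
  | nil =>
    intro cur seps active splitList hcur _ hany
    exfalso
    simp only [anySepIn, List.any_eq_true, List.contains_iff_mem, List.append_nil] at hany
    obtain ⟨c, hcs, hcc⟩ := hany
    exact hcur c hcc hcs
  | cons char rest ih =>
    intro cur seps active splitList hcur hmem hany
    by_cases hc : char ∈ seps
    · have hcontains : seps.contains char = true := by simpa [List.contains_iff_mem] using hc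
      have hactive : PySem.Set.contains active char = true := by
        simp [← hmem char, hc]
      have hnotpre : char ∉ cur := fun hm => hcur char hm hc
      rw [show cur ++ char :: rest = cur ++ char :: rest from rfl]
      simp only [splitOnceLoop, hcontains, if_pos, pySplitFirst_clean cur rest char hnotpre,
        altLoop, hactive, if_pos]
      set seps' := seps.filter (fun c => c != char) with hseps'
      have hmem' : ∀ c, c ∈ seps' ↔ c ∈ PySem.Set.discard active char := by
        intro c
        simp [hseps', List.mem_filter, PySem.Set.mem_discard, ← hmem c, and_comm]
      by_cases hany' : anySepIn seps' rest = true
      · simp only [hany', if_pos]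
        have := ih [] seps' (PySem.Set.discard active char) (splitList ++ [String.ofList cur])
          (by simp) hmem' (by simpa using hany')
        simpa using this
      · simp only [Bool.not_eq_true] at hany'
        simp only [hany', Bool.false_eq_true, if_false]
        rw [altLoop_no_active rest (PySem.Set.discard active char) (splitList ++ [String.ofList cur]) []
          (by
            intro c hcr hcd
            have hcs' : c ∈ seps' := (hmem' c).mpr hcd
            have : anySepIn seps' rest = true := by
              simp only [anySepIn, List.any_eq_true, List.contains_iff_mem]
              exact ⟨c, hcs', hcr⟩
            simp [this] at hany')]
        simp
    · have hcontains : seps.contains char = false := by simpa [List.contains_iff_mem] using hc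
      have hactive : PySem.Set.contains active char = false := by
        simp [← hmem char, hc]
      simp only [splitOnceLoop, hcontains, Bool.false_eq_true, if_false, altLoop, hactive]
      have := ih (cur ++ [char]) seps active splitList
        (by
          intro c hcm
          rcases List.mem_append.mp hcm with h1 | h1
          · exact hcur c h1
          · simp at h1; exact h1 ▸ hc)
        hmem (by simpa using hany)
      simpa using this

-- ===== VERDICT (by name: the statement is the Claim_ definition above) =====
theorem split_once_spec : Claim_equal_split_once := by
  intro text separators _
  unfold Spec_split_once split_once split_once_alt
  set seps := sepList separators with hseps
  by_cases hany : anySepIn seps text.toList = true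
  · simp only [hany, Bool.not_true, Bool.false_eq_true, if_false]
    have := loop_eq text.toList [] seps (PySem.Set.ofList seps) []
      (by simp) (fun c => by simp [PySem.Set.mem_ofList]) (by simpa using hany)
    simpa using this
  · simp only [Bool.not_eq_true] at hany
    simp only [hany, Bool.not_false, if_pos]
    rw [altLoop_no_active text.toList (PySem.Set.ofList seps) [] []
      (by
        intro c hct hcs
        have hcs' : c ∈ seps := by simpa [PySem.Set.mem_ofList] using hcs
        have : anySepIn seps text.toList = true := by
          simp only [anySepIn, List.any_eq_true, List.contains_iff_mem]
          exact ⟨c, hcs', hct⟩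
        simp [this] at hany)]
    simp
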